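-- pv_equiv track=rewrite | github.com/SelvakumarSolo/Contract-Risk-Assessment-System | backend/risk_scorer.py | calculate_contract_risk
-- ===== SOURCE A (Python) =====
-- def calculate_contract_risk(risk_list):
--     score = 0
--
--     for risk in risk_list:
--         if risk == "High":
--             score += 3
--         elif risk == "Medium":
--             score += 2
--         else:
--             score += 1
--
--     if score >= 25:
--         return "HIGH RISK"
--     elif score >= 15:
--         return "MEDIUM RISK"
--     else:
--         return "LOW RISK"
-- ===== SOURCE B (Python) =====
-- from collections import Counter
--
-- def calculate_contract_risk(risk_list):
--     counts = Counter(risk_list)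
--     total = sum(counts.values())
--     score = total + 2 * counts["High"] + counts["Medium"]
--     return "HIGH RISK" if score >= 25 else "MEDIUM RISK" if score >= 15 else "LOW RISK"
-- ===== Notes on version B (the rewrite author's own statement) =====
-- stated objective: simpler
-- what changed: Replaces the per-element if/elif accumulation with a single Counter tally and a closed-form score (total + 2*high + medium) followed by the same threshold chain.
import Mathlib
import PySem

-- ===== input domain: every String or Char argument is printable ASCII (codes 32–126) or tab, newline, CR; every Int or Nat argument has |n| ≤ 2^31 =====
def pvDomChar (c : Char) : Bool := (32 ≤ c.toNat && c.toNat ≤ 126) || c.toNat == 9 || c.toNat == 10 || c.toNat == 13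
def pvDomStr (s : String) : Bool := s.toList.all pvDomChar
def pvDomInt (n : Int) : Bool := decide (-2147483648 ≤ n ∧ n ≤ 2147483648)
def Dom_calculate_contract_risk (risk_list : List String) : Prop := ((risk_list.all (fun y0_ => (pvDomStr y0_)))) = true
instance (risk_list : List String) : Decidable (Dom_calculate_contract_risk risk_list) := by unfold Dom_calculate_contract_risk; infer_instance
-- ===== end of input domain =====

-- B replaces A's per-element if/elif accumulation by a Counter tally and a closed-form score (simpler).

-- ===== PORT A =====
def calculate_contract_risk (risk_list : List String) : String :=
  let score : Int := risk_list.foldl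
    (fun score risk =>
      if risk == "High" then score + 3
      else if risk == "Medium" then score + 2
      else score + 1) 0
  if score ≥ 25 then "HIGH RISK"
  else if score ≥ 15 then "MEDIUM RISK"
  else "LOW RISK"

-- ===== PORT B =====
def calculate_contract_risk_alt (risk_list : List String) : String :=
  let counts := PySem.Dict.counter risk_list
  let total : Int := counts.values.sum
  let score : Int := total + 2 * counts.getD "High" 0 + counts.getD "Medium" 0
  if score ≥ 25 then "HIGH RISK"
  else if score ≥ 15 then "MEDIUM RISK"
  else "LOW RISK"

-- ===== PRECONDITION & SPEC =====
def Spec_calculate_contract_risk (risk_list : List String) (out : String) : Prop := out = calculate_contract_risk_alt risk_list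
instance (risk_list : List String) (out : String) : Decidable (Spec_calculate_contract_risk risk_list out) := by unfold Spec_calculate_contract_risk; infer_instance

-- ===== CLAIM (what is proved, stated in full; the proofs are below) =====
def Claim_equal_calculate_contract_risk : Prop := ∀ (risk_list : List String), Dom_calculate_contract_risk risk_list → Spec_calculate_contract_risk risk_list (calculate_contract_risk risk_list)

-- ===== LEMMAS AND PROOFS =====

-- A's loop in closed form: base 1 per element plus 2 extra per "High" and 1 extra per "Medium".
theorem foldA_closed (xs : List String) (s : Int) :
    xs.foldl (fun score risk =>
      if risk == "High" then score + 3
      else if risk == "Medium" then score + 2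
      else score + 1) s
    = s + xs.length + 2 * xs.count "High" + xs.count "Medium" := by
  induction xs generalizing s with
  | nil => simp
  | cons x xs ih =>
    simp only [List.foldl_cons, ih, List.count_cons, List.length_cons]
    by_cases hH : x = "High"
    · subst hH; simp; ring
    · by_cases hM : x = "Medium"
      · subst hM; simp; ring
      · simp [hH, hM]; ring

-- The sum of Counter(xs)'s values is len(xs).
theorem counter_values_sum (xs : List String) :
    (PySem.Dict.counter xs).values.sum = (xs.length : Int) := by
  have hvals : (PySem.Dict.counter xs).values
      = (PySem.Set.ofList xs).map (fun k => (xs.count k : Int)) := by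
    have h := PySem.Dict.items_counter (xs := xs)
    calc (PySem.Dict.counter xs).values
        = (PySem.Dict.counter xs).items.map Prod.snd := rfl
      _ = ((PySem.Set.ofList xs).map (fun k => (k, (xs.count k : Int)))).map Prod.snd := by rw [h]
      _ = (PySem.Set.ofList xs).map (fun k => (xs.count k : Int)) := by
          simp [List.map_map, Function.comp]
  rw [hvals]
  have hperm : (PySem.Set.ofList xs).Perm xs.dedup := by
    rw [List.perm_ext_iff_of_nodup (PySem.Set.nodup_ofList xs) xs.nodup_dedup]
    intro a; simp [PySem.Set.mem_ofList]
  have := (hperm.map (fun k => (xs.count k : Int))).sum_eq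
  rw [this]
  have hnat : (xs.dedup.map fun k => xs.count k).sum = xs.length :=
    List.sum_map_count_dedup_eq_length xs
  calc (xs.dedup.map fun k => (xs.count k : Int)).sum
      = ((xs.dedup.map fun k => xs.count k).sum : Int) := by
        rw [Nat.cast_list_sum, List.map_map]; rfl
    _ = (xs.length : Int) := by rw [hnat]

-- ===== VERDICT (by name: the statement is the Claim_ definition above) =====
theorem calculate_contract_risk_spec : Claim_equal_calculate_contract_risk := by
  intro risk_list _
  show calculate_contract_risk risk_list = calculate_contract_risk_alt risk_list
  simp only [calculate_contract_risk, calculate_contract_risk_alt, foldA_closed,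
    counter_values_sum, PySem.Dict.getD_counter, zero_add]
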